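-- pv_equiv track=rewrite | github.com/thomasklimek/Projects_Portfolio | Harmony Generation Using Reinforcement Learning/MusicBank.py | get_scale_chords
-- ===== SOURCE A (Python) =====
-- MAJOR_CHORDS = [['a','c#','e'], ['a#','d','f'], ['b', 'd#', 'f#'], ['c','e','g'], ['c#','f','g#'], ['d', 'f#', 'a'], ['d#', 'g', 'a#'], ['e', 'g#', 'b'], ['f', 'a', 'c'], ['f#', 'a#', 'c#'], ['g', 'b', 'd'], ['g#', 'c', 'd#']]
--
-- MINOR_CHORDS = [['a','c','e'], ['a#','c#','f'], ['b', 'd', 'f#'], ['c','d#','g'], ['c#','e','g#'], ['d', 'f', 'a'], ['d#', 'f#', 'a#'], ['e', 'g', 'b'], ['f', 'g#', 'c'], ['f#', 'a', 'c#'], ['g', 'a#', 'd'], ['g#', 'b', 'd#']]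
--
-- DIM_CHORDS = [['a','c','d#'], ['a#','c#','e'], ['b', 'd', 'f'], ['c','d#','f#'], ['c#','e','g'], ['d', 'f', 'g#'], ['d#', 'f#', 'a'], ['e', 'g', 'a#'], ['f', 'g#', 'b'], ['f#', 'a', 'c'], ['g', 'a#', 'c#'], ['g#', 'b', 'd']]
--
-- ALL_NOTES = ['a', 'a#', 'b', 'c', 'c#', 'd', 'd#', 'e', 'f', 'f#', 'g', 'g#']
--
-- def get_scale_chords(root, major=True):
--
-- 	rootInt = ALL_NOTES.index(root)
--
-- 	if major:
-- 		chord_types = [0,1,1,0,0,1,2]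
-- 		interval = [0,2,4,5,7,9,11]
-- 	else:
-- 		chord_types = [1,2,0,1,1,0,0]
-- 		interval = [0,2,3,5,7,8,10]
--
-- 	chords = []
-- 	for i,ct in enumerate(chord_types):
-- 		cn = (rootInt+interval[i])%len(ALL_NOTES)
-- 		if ct == 0:
-- 			chords.append(MAJOR_CHORDS[cn])
-- 		if ct == 1:
-- 			chords.append(MINOR_CHORDS[cn])
-- 		if ct == 2:
-- 			chords.append(DIM_CHORDS[cn])
--
-- 	return chords
-- ===== SOURCE B (Python) =====
-- ALL_NOTES = ['a', 'a#', 'b', 'c', 'c#', 'd', 'd#', 'e', 'f', 'f#', 'g', 'g#']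
--
-- def get_scale_chords(root, major=True):
--     rootInt = ALL_NOTES.index(root)
--     if major:
--         chord_types = [0, 1, 1, 0, 0, 1, 2]
--         interval = [0, 2, 4, 5, 7, 9, 11]
--     else:
--         chord_types = [1, 2, 0, 1, 1, 0, 0]
--         interval = [0, 2, 3, 5, 7, 8, 10]
--     offsets = [[0, 4, 7], [0, 3, 7], [0, 3, 6]]  # major, minor, diminished triads
--     return [[ALL_NOTES[(rootInt + iv + off) % 12] for off in offsets[ct]]
--             for ct, iv in zip(chord_types, interval)]
-- ===== Notes on version B (the rewrite author's own statement) =====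
-- stated objective: simpler
-- what changed: Replaced the three 12-entry chord lookup tables by per-quality interval offsets ([0,4,7]/[0,3,7]/[0,3,6]) and built each chord directly with modular arithmetic over ALL_NOTES; Pre_ excludes roots not in ALL_NOTES, where both A and B raise ValueError.
import Mathlib
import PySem

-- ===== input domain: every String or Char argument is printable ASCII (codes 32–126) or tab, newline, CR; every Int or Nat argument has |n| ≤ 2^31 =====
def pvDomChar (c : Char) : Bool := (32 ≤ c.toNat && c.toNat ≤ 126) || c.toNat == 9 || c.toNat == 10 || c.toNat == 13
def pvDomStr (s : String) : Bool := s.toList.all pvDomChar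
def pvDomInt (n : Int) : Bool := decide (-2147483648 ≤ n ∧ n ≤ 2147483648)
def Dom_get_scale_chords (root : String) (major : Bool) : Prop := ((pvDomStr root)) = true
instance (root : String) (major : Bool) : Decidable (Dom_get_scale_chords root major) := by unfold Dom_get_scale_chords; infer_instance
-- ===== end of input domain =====

-- B replaces A's three hand-written 12-entry chord tables by per-quality interval
-- offsets and modular arithmetic over ALL_NOTES (objective: simpler).

-- ===== PORT A =====
def pvAllNotes : List String :=
  ["a", "a#", "b", "c", "c#", "d", "d#", "e", "f", "f#", "g", "g#"]

def pvMajorChords : List (List String) :=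
  [["a","c#","e"], ["a#","d","f"], ["b","d#","f#"], ["c","e","g"], ["c#","f","g#"],
   ["d","f#","a"], ["d#","g","a#"], ["e","g#","b"], ["f","a","c"], ["f#","a#","c#"],
   ["g","b","d"], ["g#","c","d#"]]

def pvMinorChords : List (List String) :=
  [["a","c","e"], ["a#","c#","f"], ["b","d","f#"], ["c","d#","g"], ["c#","e","g#"],
   ["d","f","a"], ["d#","f#","a#"], ["e","g","b"], ["f","g#","c"], ["f#","a","c#"],
   ["g","a#","d"], ["g#","b","d#"]]

def pvDimChords : List (List String) :=
  [["a","c","d#"], ["a#","c#","e"], ["b","d","f"], ["c","d#","f#"], ["c#","e","g"],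
   ["d","f","g#"], ["d#","f#","a"], ["e","g","a#"], ["f","g#","b"], ["f#","a","c"],
   ["g","a#","c#"], ["g#","b","d"]]

-- rootInt = ALL_NOTES.index(root); raises ValueError outside Pre_, so getD 0 is never used inside Pre_
def get_scale_chords (root : String) (major : Bool) : List (List String) :=
  let rootInt : Int := (PySem.List.index? pvAllNotes root).getD 0
  let chord_types : List Int := if major then [0,1,1,0,0,1,2] else [1,2,0,1,1,0,0]
  let interval : List Int := if major then [0,2,4,5,7,9,11] else [0,2,3,5,7,8,10]
  (PySem.List.enumerate chord_types).foldl (fun chords ict =>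
    let i := ict.1
    let ct := ict.2
    let cn := PySem.Int.mod (rootInt + (PySem.List.pyGet? interval i).getD 0) 12
    let chords := if ct = 0 then chords ++ [(PySem.List.pyGet? pvMajorChords cn).getD []] else chords
    let chords := if ct = 1 then chords ++ [(PySem.List.pyGet? pvMinorChords cn).getD []] else chords
    if ct = 2 then chords ++ [(PySem.List.pyGet? pvDimChords cn).getD []] else chords) []

-- ===== PORT B =====
def get_scale_chords_alt (root : String) (major : Bool) : List (List String) :=
  let rootInt : Int := (PySem.List.index? pvAllNotes root).getD 0
  let chord_types : List Int := if major then [0,1,1,0,0,1,2] else [1,2,0,1,1,0,0]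
  let interval : List Int := if major then [0,2,4,5,7,9,11] else [0,2,3,5,7,8,10]
  let offsets : List (List Int) := [[0,4,7], [0,3,7], [0,3,6]]
  (List.zip chord_types interval).map (fun ci =>
    ((PySem.List.pyGet? offsets ci.1).getD []).map (fun off =>
      (PySem.List.pyGet? pvAllNotes (PySem.Int.mod (rootInt + ci.2 + off) 12)).getD ""))

-- ===== PRECONDITION & SPEC =====
-- Pre_ excludes exactly the roots not in ALL_NOTES, on which A (and B) raise ValueError.
def Pre_get_scale_chords (root : String) (major : Bool) : Prop := root ∈ pvAllNotes
instance (root : String) (major : Bool) : Decidable (Pre_get_scale_chords root major) := by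
  unfold Pre_get_scale_chords; infer_instance

def pvWitness_get_scale_chords : String × Bool := ("c", true)

def Spec_get_scale_chords (root : String) (major : Bool) (out : List (List String)) : Prop :=
  out = get_scale_chords_alt root major
instance (root : String) (major : Bool) (out : List (List String)) :
    Decidable (Spec_get_scale_chords root major out) := by
  unfold Spec_get_scale_chords; infer_instance

-- ===== CLAIM (what is proved, stated in full; the proofs are below) =====
def Claim_equal_get_scale_chords : Prop :=
  ∀ (root : String) (major : Bool), Dom_get_scale_chords root major →
    Pre_get_scale_chords root major →
    Spec_get_scale_chords root major (get_scale_chords root major)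

-- ===== LEMMAS AND PROOFS =====

-- ===== VERDICT (by name: the statement is the Claim_ definition above) =====
theorem get_scale_chords_spec : Claim_equal_get_scale_chords := by
  intro root major _ hpre
  unfold Pre_get_scale_chords pvAllNotes at hpre
  unfold Spec_get_scale_chords
  fin_cases hpre <;> cases major <;> decide
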